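-- pv_equiv track=rewrite | github.com/lidongdongbuaa/leetcode2.0 | 数据结构与算法基础/leetcode周赛/200308/Bulb Switcher III.py | numTimesAllBlue
-- ===== SOURCE A (Python) =====
-- def numTimesAllBlue(light) -> int:
--     if len(light) == 1:  # corner case
--         return 1
--
--     tmp = 0
--     light_sum = []
--     for elem in range(1, len(light) + 1):
--         tmp += elem
--         light_sum.append(tmp)
--
--     times = 0
--     tmp = 0
--     for i in range(len(light)):
--         tmp += light[i]
--         if tmp == light_sum[i]:
--             times += 1
--     return times
-- ===== SOURCE B (Python) =====
-- def numTimesAllBlue(light) -> int: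
--     # brute force: for each moment k recompute the prefix sum from scratch and
--     # compare it with the closed-form triangular number (k+1)(k+2)/2
--     return sum(1 for i in range(len(light)) if 2 * sum(light[:i + 1]) == (i + 1) * (i + 2))
-- ===== Notes on version B (the rewrite author's own statement) =====
-- stated objective: alternative
-- what changed: B drops A's precomputed triangular-number table and running accumulator: it brute-forces each moment independently, recomputing the prefix sum from scratch and comparing it with the closed-form (i+1)(i+2)/2, and removes A's unconditional len==1 special case.
-- intended difference: On singleton lists [x] with x != 1, A's len==1 special case returns 1 unconditionally, but after switching bulb x the only on-bulb is x which is blue only if x == 1, so B's 0 is the intended value. — e.g. on numTimesAllBlue([2]): A returns 1, B returns 0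
import Mathlib
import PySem

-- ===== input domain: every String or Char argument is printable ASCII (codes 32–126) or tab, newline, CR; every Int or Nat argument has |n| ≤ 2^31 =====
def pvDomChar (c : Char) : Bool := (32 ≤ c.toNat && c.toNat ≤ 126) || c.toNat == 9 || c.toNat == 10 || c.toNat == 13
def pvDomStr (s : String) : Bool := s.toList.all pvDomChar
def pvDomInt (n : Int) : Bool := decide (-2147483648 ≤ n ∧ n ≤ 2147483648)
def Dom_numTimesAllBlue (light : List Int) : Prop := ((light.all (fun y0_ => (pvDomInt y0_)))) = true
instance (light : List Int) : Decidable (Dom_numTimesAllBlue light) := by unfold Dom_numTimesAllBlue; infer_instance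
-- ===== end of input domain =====

-- B replaces A's triangular-table-then-scan with an independent brute-force check of every
-- moment against the closed-form triangular number, and drops A's unconditional len==1 answer.


-- ===== PORT A =====
def numTimesAllBlue (light : List Int) : Int :=
  if PySem.List.len light == 1 then 1
  else
    let r := (PySem.List.pyRange 1 (PySem.List.len light + 1) 1).foldl
      (fun (st : Int × List Int) elem => (st.1 + elem, st.2 ++ [st.1 + elem]))
      (0, ([] : List Int))
    let lightSum := r.2
    let r2 := (PySem.List.pyRange 0 (PySem.List.len light) 1).foldl
      (fun (st : Int × Int) i =>
        let tmp := st.1 + PySem.List.pyGetD light i 0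
        (tmp, if tmp == PySem.List.pyGetD lightSum i 0 then st.2 + 1 else st.2))
      (0, 0)
    r2.2

-- ===== PORT B =====
def numTimesAllBlue_alt (light : List Int) : Int :=
  ((PySem.List.pyRange 0 (PySem.List.len light) 1).map
    (fun i =>
      if 2 * (PySem.List.slice light none (some (i + 1))).sum == (i + 1) * (i + 2)
      then (1 : Int) else 0)).sum

-- ===== PRECONDITION & SPEC =====
-- On singleton lists [x] with x ≠ 1, A's len==1 special case returns 1 unconditionally,
-- but the only on-bulb is x, which is blue only if x == 1, so B's 0 is the intended value.
def D_numTimesAllBlue (light : List Int) : Prop := light.length = 1 ∧ light ≠ [1]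
instance (light : List Int) : Decidable (D_numTimesAllBlue light) := by
  unfold D_numTimesAllBlue; infer_instance

def Spec_numTimesAllBlue (light : List Int) (out : Int) : Prop :=
  ¬ D_numTimesAllBlue light → out = numTimesAllBlue_alt light
instance (light : List Int) (out : Int) : Decidable (Spec_numTimesAllBlue light out) := by
  unfold Spec_numTimesAllBlue; infer_instance

def pvDiffWitness_numTimesAllBlue : List Int := [2]
def pvDiffWitnessOut_numTimesAllBlue : Int × Int := (1, 0)

-- ===== CLAIM =====
def Claim_unchanged_numTimesAllBlue : Prop :=
  ∀ (light : List Int), Dom_numTimesAllBlue light →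
    Spec_numTimesAllBlue light (numTimesAllBlue light)
def Claim_changed_numTimesAllBlue : Prop :=
  Dom_numTimesAllBlue (pvDiffWitness_numTimesAllBlue) ∧
  D_numTimesAllBlue (pvDiffWitness_numTimesAllBlue) ∧
  numTimesAllBlue (pvDiffWitness_numTimesAllBlue) = pvDiffWitnessOut_numTimesAllBlue.1 ∧
  numTimesAllBlue_alt (pvDiffWitness_numTimesAllBlue) = pvDiffWitnessOut_numTimesAllBlue.2 ∧
  pvDiffWitnessOut_numTimesAllBlue.1 ≠ pvDiffWitnessOut_numTimesAllBlue.2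
def Claim_exact_numTimesAllBlue : Prop :=
  ∀ (light : List Int), Dom_numTimesAllBlue light → D_numTimesAllBlue light →
    numTimesAllBlue light ≠ numTimesAllBlue_alt light

-- ===== LEMMAS AND PROOFS =====

-- triangular numbers 0, 1, 3, 6, …
def tri : Nat → Int
  | 0 => 0
  | n + 1 => tri n + (n + 1)

theorem two_tri (m : Nat) : 2 * tri m = (m : Int) * (m + 1) := by
  induction m with
  | zero => simp [tri]
  | succ n ih => simp only [tri]; push_cast; push_cast at ih; ring_nf; ring_nf at ih; omega

-- the common reference value: # of moments k with prefix-sum = tri (k+1)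
def ref (light : List Int) : Int :=
  ((List.range light.length).map
    (fun k => if (light.take (k + 1)).sum = tri (k + 1) then (1 : Int) else 0)).sum

theorem alt_eq_ref (light : List Int) : numTimesAllBlue_alt light = ref light := by
  unfold numTimesAllBlue_alt ref
  rw [PySem.List.len_eq, PySem.List.pyRange_zero_nat, List.map_map]
  congr 1
  apply List.map_congr_left
  intro k hk
  simp only [Function.comp]
  have hc : ((k : Int) + 1) = ((k + 1 : Nat) : Int) := by push_cast; ring
  rw [hc, PySem.List.slice_to_natCast]
  have h2 := two_tri (k + 1)
  have key : (2 * (light.take (k+1)).sum = ((k+1 : Nat) : Int) * ((k:Int) + 2)) ↔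
      (light.take (k+1)).sum = tri (k+1) := by
    rw [show ((k:Int) + 2) = ((k+1:Nat):Int) + 1 by push_cast; ring, ← h2]
    omega
  simp only [beq_iff_eq]
  split_ifs with hA hB
  · rfl
  · exact absurd (key.mp hA) hB
  · exact absurd (key.mpr ‹_›) hA
  · rfl

-- A's first loop builds exactly the triangular numbers tri 1 … tri m
theorem fold1_eq (m : Nat) :
    (PySem.List.pyRange 1 ((m : Int) + 1) 1).foldl
      (fun (st : Int × List Int) elem => (st.1 + elem, st.2 ++ [st.1 + elem]))
      (0, ([] : List Int))
    = (tri m, (List.range m).map (fun k => tri (k + 1))) := by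
  induction m with
  | zero => simp [PySem.List.pyRange_one_eq_nil, tri]
  | succ n ih =>
      have hc : ((n + 1 : Nat) : Int) + 1 = ((n : Int) + 1) + 1 := by push_cast; ring
      rw [hc, PySem.List.pyRange_one_succ_right (by omega), List.foldl_append, ih]
      simp [tri, List.range_succ]

-- invariant of A's second loop: (prefix sum so far, matches counted so far)
theorem fold2_eq (light : List Int) (m : Nat) (hm : m ≤ light.length) :
    (PySem.List.pyRange 0 (m : Int) 1).foldl
      (fun (st : Int × Int) i =>
        let tmp := st.1 + PySem.List.pyGetD light i 0
        (tmp, if tmp == PySem.List.pyGetD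
            ((List.range light.length).map (fun k => tri (k + 1))) i 0
          then st.2 + 1 else st.2))
      (0, 0)
    = ((light.take m).sum,
       ((List.range m).map
         (fun k => if (light.take (k + 1)).sum = tri (k + 1) then (1 : Int) else 0)).sum) := by
  induction m with
  | zero => simp [PySem.List.pyRange_one_eq_nil]
  | succ n ih =>
      have hc : ((n + 1 : Nat) : Int) = ((n : Int)) + 1 := by push_cast; ring
      rw [hc, PySem.List.pyRange_one_succ_right (by omega), List.foldl_append,
        ih (by omega)]
      have hn : n < light.length := by omega
      simp only [List.foldl_cons, List.foldl_nil, PySem.List.pyGetD_natCast,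
        PySem.List.getD_map_range _ _ _ _ hn]
      have htake : (light.take (n + 1)).sum = (light.take n).sum + light.getD n 0 := by
        rw [List.take_add_one]
        simp [List.getD, hn]
      rw [List.range_succ]
      simp only [List.map_append, List.sum_append, List.map_cons, List.map_nil,
        List.sum_cons, List.sum_nil, beq_iff_eq]
      simp [Prod.mk.injEq, htake]
      split_ifs <;> omega

theorem a_eq_ref (light : List Int) (h : light.length ≠ 1) :
    numTimesAllBlue light = ref light := by
  unfold numTimesAllBlue
  rw [PySem.List.len_eq]
  have hne : ((light.length : Int) == 1) = false := by
    simp only [beq_eq_false_iff_ne, ne_eq]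
    omega
  rw [hne]
  simp only [Bool.false_eq_true, if_false]
  rw [fold1_eq light.length]
  rw [fold2_eq light light.length le_rfl]
  simp [ref]

-- ===== VERDICT =====
theorem numTimesAllBlue_spec : Claim_unchanged_numTimesAllBlue := by
  intro light _hdom
  unfold Spec_numTimesAllBlue
  intro hnd
  by_cases hl : light.length = 1
  · have h1 : light = [1] := by
      by_contra hx
      exact hnd ⟨hl, hx⟩
    subst h1
    decide
  · rw [a_eq_ref light hl, alt_eq_ref]

theorem numTimesAllBlue_changed : Claim_changed_numTimesAllBlue := by
  unfold Claim_changed_numTimesAllBlue; decide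

theorem numTimesAllBlue_tight : Claim_exact_numTimesAllBlue := by
  unfold Claim_exact_numTimesAllBlue
  intro light _hdom hd
  obtain ⟨h1, h2⟩ := hd
  match light, h1, h2 with
  | [x], _, h2 =>
    have hx : x ≠ 1 := fun h => h2 (by rw [h])
    rw [show numTimesAllBlue [x] = 1 from rfl]
    unfold numTimesAllBlue_alt
    rw [show PySem.List.len [x] = (1:Int) from rfl,
        show PySem.List.pyRange 0 1 1 = [0] from rfl]
    simp only [List.map_cons, List.map_nil, List.sum_cons, List.sum_nil]
    rw [show PySem.List.slice [x] none (some (0+1)) = [x] from rfl]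
    simp only [List.sum_cons, List.sum_nil, beq_iff_eq]
    split_ifs with h
    · omega
    · omega
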